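-- pv_equiv track=rewrite | github.com/padril/pyzeus | cf.py | convert_escaped
-- ===== SOURCE A (Python) =====
-- def convert_escaped(s: str) -> str:
--         ESCAPED = {
--                 '\\n': '\n',
--                 '\\r': '\r',
--                 '\\t': '\t',
--                 '\\f': '\f',
--                 '\\b': '\b',
--                 }
--         for key, val in ESCAPED.items():
--             s = s.replace(key, val)
--         return s.replace('\\', '')
-- ===== SOURCE B (Python) =====
-- def convert_escaped(s: str) -> str:
--     ESC = {'n': '\n', 'r': '\r', 't': '\t', 'f': '\f', 'b': '\b'}
--     out = []
--     i = 0
--     n = len(s)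
--     while i < n:
--         c = s[i]
--         if c != '\\':
--             out.append(c)
--             i += 1
--         elif i + 1 < n and s[i + 1] in ESC:
--             out.append(ESC[s[i + 1]])
--             i += 2
--         else:
--             i += 1  # drop the unmatched backslash
--     return ''.join(out)
-- ===== Notes on version B (the rewrite author's own statement) =====
-- stated objective: simpler
-- what changed: A makes six full passes over the string (five str.replace calls plus a final backslash-stripping replace); B does one left-to-right scan that peeks one character after each backslash and emits the control character or drops the backslash.
import Mathlib
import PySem

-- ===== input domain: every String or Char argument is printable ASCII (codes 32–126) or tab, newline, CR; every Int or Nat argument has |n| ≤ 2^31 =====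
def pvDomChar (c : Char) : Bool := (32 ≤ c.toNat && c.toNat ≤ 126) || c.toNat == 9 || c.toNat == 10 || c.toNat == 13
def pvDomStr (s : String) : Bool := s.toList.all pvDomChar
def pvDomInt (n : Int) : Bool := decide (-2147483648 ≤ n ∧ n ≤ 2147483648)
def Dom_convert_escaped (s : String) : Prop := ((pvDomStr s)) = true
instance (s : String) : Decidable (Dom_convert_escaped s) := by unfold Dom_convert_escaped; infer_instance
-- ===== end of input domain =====

-- B replaces A's five sequential str.replace passes plus a final backslash-stripping pass
-- with a single left-to-right scan (objective: simpler — one pass instead of six).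

-- ===== PORT A =====
def convert_escaped (s : String) : String :=
  -- the for-loop over ESCAPED.items() applies the five replaces in dict insertion order
  let s1 := PySem.Str.replace s "\\n" "\n"
  let s2 := PySem.Str.replace s1 "\\r" "\r"
  let s3 := PySem.Str.replace s2 "\\t" "\t"
  let s4 := PySem.Str.replace s3 "\\f" "\x0C"
  let s5 := PySem.Str.replace s4 "\\b" "\x08"
  PySem.Str.replace s5 "\\" ""

-- ===== PORT B =====
-- the ESC dict of Source B (dict → association list, first-match lookup)
def pvESC : List (Char × Char) :=
  [('n', '\n'), ('r', '\r'), ('t', '\t'), ('f', '\x0C'), ('b', '\x08')]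

-- the while-loop of Source B: `while i < n` becomes recursion over the remaining characters
def convertLoop : List Char → List Char
  | [] => []
  | c :: t =>
    if c ≠ '\\' then c :: convertLoop t
    else
      match t with
      | [] => []                        -- i + 1 < n fails: drop the unmatched backslash
      | d :: t' =>
        match pvESC.lookup d with
        | some v => v :: convertLoop t'  -- s[i+1] in ESC: emit control char, i += 2
        | none => convertLoop (d :: t')  -- drop the unmatched backslash, i += 1
termination_by l => l.length
decreasing_by all_goals simp

def convert_escaped_alt (s : String) : String :=
  String.ofList (convertLoop s.toList)

-- ===== PRECONDITION & SPEC =====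
def Spec_convert_escaped (s : String) (out : String) : Prop := out = convert_escaped_alt s
instance (s : String) (out : String) : Decidable (Spec_convert_escaped s out) := by unfold Spec_convert_escaped; infer_instance

-- ===== CLAIM (what is proved, stated in full; the proofs are below) =====
def Claim_equal_convert_escaped : Prop := ∀ (s : String), Dom_convert_escaped s → Spec_convert_escaped s (convert_escaped s)

-- ===== LEMMAS AND PROOFS =====

-- equations of PySem.Chars.replace.go (all definitional)
theorem go_zero (old new l acc) : PySem.Chars.replace.go old new 0 l acc = acc.reverse ++ l := rfl
theorem go_nil (old new n acc) : PySem.Chars.replace.go old new (n+1) [] acc = acc.reverse := rfl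
theorem go_cons (old new n c t acc) : PySem.Chars.replace.go old new (n+1) (c::t) acc =
    (if old.isPrefixOf (c::t) then
        PySem.Chars.replace.go old new n (List.drop old.length (c::t)) (new.reverse ++ acc)
     else PySem.Chars.replace.go old new n t (c::acc)) := rfl

-- what ONE of A's replaces s.replace('\k', v) computes, structurally
def stageF (k v : Char) : List Char → List Char
  | [] => []
  | c :: t =>
    if c = '\\' then
      match t with
      | [] => ['\\']
      | d :: t' => if d = k then v :: stageF k v t' else '\\' :: stageF k v (d :: t')
    else c :: stageF k v t
termination_by l => l.length
decreasing_by all_goals simp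

theorem stageF_nil (k v) : stageF k v [] = [] := by rw [stageF.eq_def]
theorem stageF_cons_nb (k v c t) (hc : c ≠ '\\') : stageF k v (c :: t) = c :: stageF k v t := by
  rw [stageF.eq_def]; simp [hc]
theorem stageF_bs_nil (k v) : stageF k v ['\\'] = ['\\'] := by rw [stageF.eq_def]; simp
theorem stageF_bs_cons (k v d t') : stageF k v ('\\' :: d :: t') =
    (if d = k then v :: stageF k v t' else '\\' :: stageF k v (d :: t')) := by
  rw [stageF.eq_def]; simp

theorem convertLoop_nil : convertLoop [] = [] := by rw [convertLoop.eq_def]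
theorem convertLoop_cons_nb (c t) (hc : c ≠ '\\') : convertLoop (c :: t) = c :: convertLoop t := by
  rw [convertLoop.eq_def]; simp [hc]
theorem convertLoop_bs_nil : convertLoop ['\\'] = [] := by rw [convertLoop.eq_def]; simp
theorem convertLoop_bs_cons (d t') : convertLoop ('\\' :: d :: t') =
    (match pvESC.lookup d with
     | some v => v :: convertLoop t'
     | none => convertLoop (d :: t')) := by
  rw [convertLoop.eq_def]; simp

-- generalisation of convertLoop to an arbitrary escape table
def gmulti (L : List (Char × Char)) : List Char → List Char
  | [] => []
  | c :: t =>
    if c ≠ '\\' then c :: gmulti L t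
    else
      match t with
      | [] => []
      | d :: t' =>
        match L.lookup d with
        | some v => v :: gmulti L t'
        | none => gmulti L (d :: t')
termination_by l => l.length
decreasing_by all_goals simp

theorem gmulti_nil (L) : gmulti L [] = [] := by rw [gmulti.eq_def]
theorem gmulti_cons_nb (L c t) (hc : c ≠ '\\') : gmulti L (c :: t) = c :: gmulti L t := by
  rw [gmulti.eq_def]; simp [hc]
theorem gmulti_bs_nil (L) : gmulti L ['\\'] = [] := by rw [gmulti.eq_def]; simp
theorem gmulti_bs_cons (L d t') : gmulti L ('\\' :: d :: t') =
    (match L.lookup d with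
     | some v => v :: gmulti L t'
     | none => gmulti L (d :: t')) := by
  rw [gmulti.eq_def]; simp

theorem go_stage (k v : Char) :
    ∀ (fuel : Nat) (l acc : List Char), l.length ≤ fuel →
      PySem.Chars.replace.go ['\\', k] [v] fuel l acc = acc.reverse ++ stageF k v l := by
  intro fuel
  induction fuel with
  | zero =>
    intro l acc h
    have : l = [] := List.eq_nil_of_length_eq_zero (Nat.le_zero.mp h)
    subst this
    rw [go_zero, stageF_nil]
  | succ n ih =>
    intro l acc h
    match l with
    | [] => rw [go_nil, stageF_nil]; simp
    | c :: t =>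
      simp only [List.length_cons] at h
      rw [go_cons]
      by_cases hc : c = '\\'
      · subst hc
        match t with
        | [] =>
          rw [if_neg (by simp [List.isPrefixOf]), stageF_bs_nil]
          cases n with
          | zero => rw [go_zero]; simp
          | succ m => rw [go_nil]; simp
        | d :: t' =>
          simp only [List.length_cons] at h
          have hpre : List.isPrefixOf ['\\', k] ('\\' :: d :: t') = (k == d) := by
            simp [List.isPrefixOf]
          by_cases hd : d = k
          · rw [if_pos (by rw [hpre]; exact beq_iff_eq.mpr hd.symm), stageF_bs_cons, if_pos hd]
            have hdrop : List.drop ['\\', k].length ('\\' :: d :: t') = t' := rfl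
            rw [hdrop, ih t' ([v].reverse ++ acc) (by omega)]
            simp
          · rw [if_neg (by rw [hpre]; exact fun hco => hd (beq_iff_eq.mp hco).symm),
                stageF_bs_cons, if_neg hd, ih (d :: t') ('\\' :: acc) (by simp; omega)]
            simp
      · rw [if_neg (by simp [List.isPrefixOf]; intro hco; exact absurd hco.symm hc),
            stageF_cons_nb k v c t hc, ih t (c :: acc) (by omega)]
        simp

theorem replace_eq_stage (k v : Char) (l : List Char) :
    PySem.Chars.replace l ['\\', k] [v] = stageF k v l := by
  unfold PySem.Chars.replace
  rw [if_neg (by simp)]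
  simpa using go_stage k v l.length l [] le_rfl

theorem go_strip :
    ∀ (fuel : Nat) (l acc : List Char), l.length ≤ fuel →
      PySem.Chars.replace.go ['\\'] [] fuel l acc = acc.reverse ++ l.filter (· != '\\') := by
  intro fuel
  induction fuel with
  | zero =>
    intro l acc h
    have : l = [] := List.eq_nil_of_length_eq_zero (Nat.le_zero.mp h)
    subst this
    rw [go_zero]; simp
  | succ n ih =>
    intro l acc h
    match l with
    | [] => rw [go_nil]; simp
    | c :: t =>
      rw [go_cons]
      simp only [List.length_cons] at h
      by_cases hc : c = '\\'
      · subst hc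
        rw [if_pos (by simp [List.isPrefixOf])]
        have hdrop : List.drop ['\\'].length ('\\' :: t) = t := rfl
        rw [hdrop, ih t ([].reverse ++ acc) (by omega)]
        simp
      · rw [if_neg (by simp [List.isPrefixOf]; intro hco; exact absurd hco.symm hc),
            ih t (c :: acc) (by omega)]
        simp [hc]

theorem replace_eq_strip (l : List Char) :
    PySem.Chars.replace l ['\\'] [] = l.filter (· != '\\') := by
  unfold PySem.Chars.replace
  rw [if_neg (by simp)]
  simpa using go_strip l.length l [] le_rfl

theorem convertLoop_eq_gmulti : ∀ l, convertLoop l = gmulti pvESC l := by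
  have H : ∀ n l, l.length ≤ n → convertLoop l = gmulti pvESC l := by
    intro n
    induction n with
    | zero =>
      intro l h
      have : l = [] := List.eq_nil_of_length_eq_zero (Nat.le_zero.mp h)
      subst this; rw [convertLoop_nil, gmulti_nil]
    | succ n ih =>
      intro l h
      match l with
      | [] => rw [convertLoop_nil, gmulti_nil]
      | c :: t =>
        simp only [List.length_cons] at h
        by_cases hc : c = '\\'
        · subst hc
          match t with
          | [] => rw [convertLoop_bs_nil, gmulti_bs_nil]
          | d :: t' =>
            simp only [List.length_cons] at h
            rw [convertLoop_bs_cons, gmulti_bs_cons]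
            cases hl : pvESC.lookup d with
            | some v => simp only [ih t' (by omega)]
            | none => simp only [ih (d :: t') (by simp; omega)]
        · rw [convertLoop_cons_nb c t hc, gmulti_cons_nb pvESC c t hc, ih t (by omega)]
  exact fun l => H l.length l le_rfl

theorem gmulti_nil_eq_filter : ∀ l, gmulti [] l = l.filter (· != '\\') := by
  have H : ∀ n l, l.length ≤ n → gmulti [] l = l.filter (· != '\\') := by
    intro n
    induction n with
    | zero =>
      intro l h
      have : l = [] := List.eq_nil_of_length_eq_zero (Nat.le_zero.mp h)
      subst this; rw [gmulti_nil]; simp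
    | succ n ih =>
      intro n' h
      match n' with
      | [] => rw [gmulti_nil]; simp
      | c :: t =>
        simp only [List.length_cons] at h
        by_cases hc : c = '\\'
        · subst hc
          match t with
          | [] => rw [gmulti_bs_nil]; simp
          | d :: t' =>
            simp only [List.length_cons] at h
            rw [gmulti_bs_cons]
            simp only [List.lookup]
            rw [ih (d :: t') (by simp; omega)]
            simp
        · rw [gmulti_cons_nb [] c t hc, ih t (by omega)]
          simp [hc]
  exact fun l => H l.length l le_rfl

-- head shape of stageF on a string starting with a backslash
theorem stageF_bs_head (k v : Char) (t : List Char) :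
    ∃ h w, stageF k v ('\\' :: t) = h :: w ∧ (h = '\\' ∨ h = v) := by
  match t with
  | [] => exact ⟨'\\', [], stageF_bs_nil k v, Or.inl rfl⟩
  | d :: t' =>
    by_cases hd : d = k
    · exact ⟨v, stageF k v t', by rw [stageF_bs_cons, if_pos hd], Or.inr rfl⟩
    · exact ⟨'\\', stageF k v (d :: t'), by rw [stageF_bs_cons, if_neg hd], Or.inl rfl⟩

theorem gm_stage (k v : Char) (L : List (Char × Char))
    (hk : k ≠ '\\') (hv : v ≠ '\\')
    (hLbs : L.lookup '\\' = none) (hLv : L.lookup v = none) :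
    ∀ l, gmulti L (stageF k v l) = gmulti ((k, v) :: L) l := by
  have H : ∀ n l, l.length ≤ n → gmulti L (stageF k v l) = gmulti ((k, v) :: L) l := by
    intro n
    induction n with
    | zero =>
      intro l h
      have : l = [] := List.eq_nil_of_length_eq_zero (Nat.le_zero.mp h)
      subst this; rw [stageF_nil, gmulti_nil, gmulti_nil]
    | succ n ih =>
      intro l h
      match l with
      | [] => rw [stageF_nil, gmulti_nil, gmulti_nil]
      | c :: t =>
        simp only [List.length_cons] at h
        by_cases hc : c = '\\'
        · subst hc
          match t with
          | [] => rw [stageF_bs_nil, gmulti_bs_nil, gmulti_bs_nil]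
          | d :: t' =>
            simp only [List.length_cons] at h
            by_cases hd : d = k
            · rw [stageF_bs_cons, if_pos hd, gmulti_cons_nb L v _ hv, gmulti_bs_cons,
                  show ((k, v) :: L).lookup d = some v from by simp [List.lookup, hd],
                  ih t' (by omega)]
            · by_cases hdb : d = '\\'
              · -- s = '\' '\' t' : both sides drop the first backslash
                subst hdb
                rw [stageF_bs_cons, if_neg hd]
                obtain ⟨hh, w, hw, hhd⟩ := stageF_bs_head k v t'
                have hlk : L.lookup hh = none := by
                  cases hhd with
                  | inl e => rw [e]; exact hLbs
                  | inr e => rw [e]; exact hLv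
                rw [hw, gmulti_bs_cons, hlk, ← hw, ih ('\\' :: t') (by simp; omega),
                    gmulti_bs_cons,
                    show ((k, v) :: L).lookup '\\' = none from by
                      simp only [List.lookup, beq_eq_false_iff_ne.mpr (Ne.symm hk)]; exact hLbs]
              · -- d is neither k nor a backslash: both drop the backslash
                rw [stageF_bs_cons, if_neg hd, stageF_cons_nb k v d t' hdb]
                cases hl : L.lookup d with
                | some v' =>
                  rw [gmulti_bs_cons, hl, gmulti_bs_cons,
                      show ((k, v) :: L).lookup d = some v' from by
                        simp only [List.lookup, beq_eq_false_iff_ne.mpr hd]; exact hl,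
                      ih t' (by omega)]
                | none =>
                  rw [gmulti_bs_cons, hl, ← stageF_cons_nb k v d t' hdb,
                      ih (d :: t') (by simp; omega), gmulti_bs_cons,
                      show ((k, v) :: L).lookup d = none from by
                        simp only [List.lookup, beq_eq_false_iff_ne.mpr hd]; exact hl]
        · rw [stageF_cons_nb k v c t hc, gmulti_cons_nb L c _ hc,
              gmulti_cons_nb ((k,v)::L) c t hc, ih t (by omega)]
  exact fun l => H l.length l le_rfl

-- ===== VERDICT (by name: the statement is the Claim_ definition above) =====
theorem convert_escaped_spec : Claim_equal_convert_escaped := by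
  intro s _
  unfold Spec_convert_escaped convert_escaped convert_escaped_alt
  simp only [PySem.Str.replace, String.toList_ofList]
  congr 1
  rw [show ("\\n" : String).toList = ['\\', 'n'] from rfl,
      show ("\\r" : String).toList = ['\\', 'r'] from rfl,
      show ("\\t" : String).toList = ['\\', 't'] from rfl,
      show ("\\f" : String).toList = ['\\', 'f'] from rfl,
      show ("\\b" : String).toList = ['\\', 'b'] from rfl,
      show ("\\" : String).toList = ['\\'] from rfl,
      show ("\n" : String).toList = ['\n'] from rfl,
      show ("\r" : String).toList = ['\r'] from rfl,
      show ("\t" : String).toList = ['\t'] from rfl,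
      show ("\x0C" : String).toList = ['\x0C'] from rfl,
      show ("\x08" : String).toList = ['\x08'] from rfl,
      show ("" : String).toList = [] from rfl]
  rw [replace_eq_stage, replace_eq_stage, replace_eq_stage, replace_eq_stage, replace_eq_stage,
      replace_eq_strip, convertLoop_eq_gmulti,
      ← gmulti_nil_eq_filter,
      gm_stage 'b' '\x08' [] (by decide) (by decide) rfl rfl,
      gm_stage 'f' '\x0C' _ (by decide) (by decide) rfl rfl,
      gm_stage 't' '\t' _ (by decide) (by decide) rfl rfl,
      gm_stage 'r' '\r' _ (by decide) (by decide) rfl rfl,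
      gm_stage 'n' '\n' _ (by decide) (by decide) rfl rfl]
  rfl
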